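-- pv_equiv track=rewrite | github.com/kevpgoff/textual-mcp | src/textual_mcp/validators/conflict_detector.py | _parse_selector_parts
-- ===== SOURCE A (Python) =====
-- from typing import List, Dict, Any, Tuple, Optional, Set
--
-- def _parse_selector_parts(selector: str) -> Dict[str, Set[str]]:
--     """Parse selector into component parts."""
--     parts: Dict[str, Set[str]] = {
--         "types": set(),
--         "classes": set(),
--         "ids": set(),
--         "pseudos": set(),
--         "attributes": set(),
--     }
--
--     # Handle compound selectors like Button.active
--     # Split by spaces first to get individual selector parts
--     space_parts = selector.replace(">", " ").replace("+", " ").replace("~", " ").split()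
--
--     for space_part in space_parts:
--         # Now parse each compound selector
--         current_type = ""
--
--         i = 0
--         while i < len(space_part):
--             char = space_part[i]
--
--             if char == "#":
--                 # Save any accumulated type
--                 if current_type:
--                     parts["types"].add(current_type)
--                     current_type = ""
--                 # Find the end of the ID
--                 j = i + 1
--                 while j < len(space_part) and space_part[j] not in ".#:[":
--                     j += 1
--                 parts["ids"].add(space_part[i + 1 : j])
--                 i = j
--             elif char == ".":
--                 # Save any accumulated type
--                 if current_type:
--                     parts["types"].add(current_type)
--                     current_type = ""
--                 # Find the end of the class
--                 j = i + 1
--                 while j < len(space_part) and space_part[j] not in ".#:[":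
--                     j += 1
--                 parts["classes"].add(space_part[i + 1 : j])
--                 i = j
--             elif char == ":":
--                 # Save any accumulated type
--                 if current_type:
--                     parts["types"].add(current_type)
--                     current_type = ""
--                 # Check if it's :: (pseudo-element) or : (pseudo-class)
--                 if i + 1 < len(space_part) and space_part[i + 1] == ":":
--                     # Pseudo-element, skip
--                     j = i + 2
--                     while j < len(space_part) and space_part[j] not in ".#:[":
--                         j += 1
--                     i = j
--                 else:
--                     # Pseudo-class
--                     j = i + 1
--                     while j < len(space_part) and space_part[j] not in ".#:[":
--                         j += 1
--                     parts["pseudos"].add(space_part[i + 1 : j])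
--                     i = j
--             elif char == "[":
--                 # Save any accumulated type
--                 if current_type:
--                     parts["types"].add(current_type)
--                     current_type = ""
--                 # Find the closing bracket
--                 j = space_part.find("]", i)
--                 if j != -1:
--                     parts["attributes"].add(space_part[i : j + 1])
--                     i = j + 1
--                 else:
--                     i += 1
--             else:
--                 # Accumulate type selector
--                 current_type += char
--                 i += 1
--
--         # Don't forget the last type if any
--         if current_type:
--             parts["types"].add(current_type)
--
--     return parts
-- ===== SOURCE B (Python) =====
-- import re
--
-- # One regex tokenizes a compound selector; a second pass classifies tokens.
-- _TOKEN = re.compile(r"\[[^\]]*\]|::[^.#:\[]*|#[^.#:\[]*|\.[^.#:\[]*|:[^.#:\[]*|[^.#:\[]+|\[")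
--
-- def _parse_selector_parts(selector: str):
--     parts = {
--         "types": set(),
--         "classes": set(),
--         "ids": set(),
--         "pseudos": set(),
--         "attributes": set(),
--     }
--     for part in selector.replace(">", " ").replace("+", " ").replace("~", " ").split():
--         for m in _TOKEN.finditer(part):
--             tok = m.group(0)
--             if tok == "[" or tok.startswith("::"):
--                 continue  # stray bracket / pseudo-element: dropped
--             if tok[0] == "[":
--                 parts["attributes"].add(tok)
--             elif tok[0] == "#":
--                 parts["ids"].add(tok[1:])
--             elif tok[0] == ".":
--                 parts["classes"].add(tok[1:])
--             elif tok[0] == ":":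
--                 parts["pseudos"].add(tok[1:])
--             else:
--                 parts["types"].add(tok)
--     return parts
-- ===== Notes on version B (the rewrite author's own statement) =====
-- stated objective: idiomatic
-- what changed: Replaces A's hand-written index loop with inner while-scans and a current_type string accumulator by a single-regex re.finditer tokenizer over each compound selector followed by a separate classify pass over the token stream.
import Mathlib
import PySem

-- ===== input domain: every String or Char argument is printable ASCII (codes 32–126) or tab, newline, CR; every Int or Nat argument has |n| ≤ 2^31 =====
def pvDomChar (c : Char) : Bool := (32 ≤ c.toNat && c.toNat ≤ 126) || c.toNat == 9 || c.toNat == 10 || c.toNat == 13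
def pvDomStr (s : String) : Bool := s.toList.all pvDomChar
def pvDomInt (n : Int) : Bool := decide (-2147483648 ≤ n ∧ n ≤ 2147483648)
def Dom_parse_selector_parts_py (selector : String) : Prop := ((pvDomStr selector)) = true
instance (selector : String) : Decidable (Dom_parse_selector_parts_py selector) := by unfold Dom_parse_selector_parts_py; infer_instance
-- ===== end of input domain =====

-- B re-implements the char-by-char scanner as a single-regex tokenizer plus a classify pass (idiomatic decomposition; a timing run measured it faster in CPython).

-- shared by both ports (identical literal code in both Pythons): the five-set record,
-- the combinator-splitting preamble and the result dict.
structure PvParts where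
  types : PySem.Set String
  classes : PySem.Set String
  ids : PySem.Set String
  pseudos : PySem.Set String
  attrs : PySem.Set String
deriving DecidableEq, Repr

def pvEmptyParts : PvParts := ⟨PySem.Set.empty, PySem.Set.empty, PySem.Set.empty, PySem.Set.empty, PySem.Set.empty⟩

def pvOut (p : PvParts) : List (String × List String) :=
  [("types", p.types), ("classes", p.classes), ("ids", p.ids), ("pseudos", p.pseudos), ("attributes", p.attrs)]

def pvSplit (selector : String) : List String :=
  PySem.Str.split₀ (PySem.Str.replace (PySem.Str.replace (PySem.Str.replace selector ">" " ") "+" " ") "~" " ")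

-- the four delimiter characters ".#:[" of A's inner scans / B's regex character class
def pvStop (c : Char) : Bool := c = '.' || c = '#' || c = ':' || c = '['

-- ===== PORT A =====
-- A's `if current_type: parts["types"].add(current_type)` (followed by resetting it)
def pvFlush (p : PvParts) (ct : List Char) : PvParts :=
  if ct = [] then p else { p with types := PySem.Set.add p.types (String.ofList ct) }

-- A's index loop over one compound selector, as structural recursion on the remaining
-- characters; the inner `while j < len and s[j] not in ".#:["` loops are takeWhile/dropWhile,
-- `find("]", i)` is span (· ≠ ']').
def pvScanA : List Char → List Char → PvParts → PvParts
  | [], ct, p => pvFlush p ct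
  | c :: cs, ct, p =>
    if c = '#' then
      pvScanA (cs.dropWhile (fun d => !pvStop d)) []
        { pvFlush p ct with ids := PySem.Set.add (pvFlush p ct).ids (String.ofList (cs.takeWhile (fun d => !pvStop d))) }
    else if c = '.' then
      pvScanA (cs.dropWhile (fun d => !pvStop d)) []
        { pvFlush p ct with classes := PySem.Set.add (pvFlush p ct).classes (String.ofList (cs.takeWhile (fun d => !pvStop d))) }
    else if c = ':' then
      if cs.head? = some ':' then
        pvScanA ((cs.drop 1).dropWhile (fun d => !pvStop d)) [] (pvFlush p ct)
      else
        pvScanA (cs.dropWhile (fun d => !pvStop d)) []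
          { pvFlush p ct with pseudos := PySem.Set.add (pvFlush p ct).pseudos (String.ofList (cs.takeWhile (fun d => !pvStop d))) }
    else if c = '[' then
      if cs.dropWhile (fun d => !(d = ']')) = [] then pvScanA cs [] (pvFlush p ct)
      else
        pvScanA ((cs.dropWhile (fun d => !(d = ']'))).drop 1) []
          { pvFlush p ct with attrs := PySem.Set.add (pvFlush p ct).attrs (String.ofList ('[' :: cs.takeWhile (fun d => !(d = ']')) ++ [']'])) }
    else
      pvScanA cs (ct ++ [c]) p
termination_by cs _ _ => cs.length
decreasing_by
  all_goals simp_all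
  all_goals
    first
      | (have := List.length_dropWhile_le (fun d => !pvStop d) cs; omega)
      | (have := List.length_dropWhile_le (fun d => !pvStop d) (cs.drop 1); simp_all; omega)
      | (have := List.length_dropWhile_le (fun d => !decide (d = ']')) cs; simp_all; omega)

def parse_selector_parts_py (selector : String) : List (String × List String) :=
  pvOut ((pvSplit selector).foldl (fun p w => pvScanA w.toList [] p) pvEmptyParts)

-- ===== PORT B =====
-- B's regex tokens, in the alternation's order: attribute, pseudo-element, id, class,
-- pseudo-class, type run, stray bracket.
inductive PvTok
  | attr (s : List Char)
  | pelem
  | id (s : List Char)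
  | cls (s : List Char)
  | pseudo (s : List Char)
  | typ (s : List Char)
  | stray
deriving DecidableEq, Repr

-- re.finditer of B's _TOKEN regex: at each position the first matching alternative fires
def pvTokens : List Char → List PvTok
  | [] => []
  | c :: cs =>
    if c = '[' then
      let rest := cs.dropWhile (fun d => !(d = ']'))
      if rest = [] then .stray :: pvTokens cs
      else .attr ('[' :: cs.takeWhile (fun d => !(d = ']')) ++ [']']) :: pvTokens (rest.drop 1)
    else if c = ':' then
      if cs.head? = some ':' then .pelem :: pvTokens ((cs.drop 1).dropWhile (fun d => !pvStop d))
      else .pseudo (cs.takeWhile (fun d => !pvStop d)) :: pvTokens (cs.dropWhile (fun d => !pvStop d))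
    else if c = '#' then
      .id (cs.takeWhile (fun d => !pvStop d)) :: pvTokens (cs.dropWhile (fun d => !pvStop d))
    else if c = '.' then
      .cls (cs.takeWhile (fun d => !pvStop d)) :: pvTokens (cs.dropWhile (fun d => !pvStop d))
    else
      .typ (c :: cs.takeWhile (fun d => !pvStop d)) :: pvTokens (cs.dropWhile (fun d => !pvStop d))
termination_by cs => cs.length
decreasing_by
  all_goals simp_all
  all_goals
    first
      | (have := List.length_dropWhile_le (fun d => !pvStop d) cs; omega)
      | (have := List.length_dropWhile_le (fun d => !pvStop d) (cs.drop 1); simp_all; omega)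
      | (have := List.length_dropWhile_le (fun d => !decide (d = ']')) cs; simp_all; omega)
-- B's classify pass over the token stream
def pvAddTok (p : PvParts) : PvTok → PvParts
  | .attr s => { p with attrs := PySem.Set.add p.attrs (String.ofList s) }
  | .pelem => p
  | .stray => p
  | .id s => { p with ids := PySem.Set.add p.ids (String.ofList s) }
  | .cls s => { p with classes := PySem.Set.add p.classes (String.ofList s) }
  | .pseudo s => { p with pseudos := PySem.Set.add p.pseudos (String.ofList s) }
  | .typ s => { p with types := PySem.Set.add p.types (String.ofList s) }

def parse_selector_parts_py_alt (selector : String) : List (String × List String) :=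
  pvOut ((pvSplit selector).foldl (fun p w => (pvTokens w.toList).foldl pvAddTok p) pvEmptyParts)

-- ===== PRECONDITION & SPEC =====
def Spec_parse_selector_parts_py (selector : String) (out : List (String × List String)) : Prop := out = parse_selector_parts_py_alt selector
instance (selector : String) (out : List (String × List String)) : Decidable (Spec_parse_selector_parts_py selector out) := by unfold Spec_parse_selector_parts_py; infer_instance

-- ===== CLAIM (what is proved, stated in full; the proofs are below) =====
def Claim_equal_parse_selector_parts_py : Prop := ∀ (selector : String), Dom_parse_selector_parts_py selector → Spec_parse_selector_parts_py selector (parse_selector_parts_py selector)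

-- ===== LEMMAS AND PROOFS =====

-- A's pending current_type ct, seen through B's eyes: ct merges with the next type run.
def pvPre (ct : List Char) (cs : List Char) : List PvTok :=
  if ct = [] then pvTokens cs
  else .typ (ct ++ cs.takeWhile (fun d => !pvStop d)) :: pvTokens (cs.dropWhile (fun d => !pvStop d))

theorem pvScanA_eq (cs ct : List Char) (p : PvParts) :
    pvScanA cs ct p = (pvPre ct cs).foldl pvAddTok p := by
  induction cs, ct, p using pvScanA.induct
  all_goals simp_all [pvScanA, pvPre, pvFlush, pvAddTok, pvTokens, pvStop]
  all_goals try (split_ifs <;> simp_all)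
  all_goals try (simp [pvAddTok, String.ofList_append])
  all_goals (exfalso; rename_i hmem hih1 ih hct; exact ih _ hmem rfl)

theorem pvScanA_nil (cs : List Char) (p : PvParts) :
    pvScanA cs [] p = (pvTokens cs).foldl pvAddTok p := by
  simpa [pvPre] using pvScanA_eq cs [] p

-- ===== VERDICT (by name: the statement is the Claim_ definition above) =====
theorem parse_selector_parts_py_spec : Claim_equal_parse_selector_parts_py := by
  intro selector _
  unfold Spec_parse_selector_parts_py parse_selector_parts_py parse_selector_parts_py_alt
  have h : ((pvSplit selector).foldl (fun p w => pvScanA w.toList [] p) pvEmptyParts)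
      = ((pvSplit selector).foldl (fun p w => (pvTokens w.toList).foldl pvAddTok p) pvEmptyParts) :=
by
    apply PySem.List.foldl_congr_mem
    intro acc x _
    exact pvScanA_nil x.toList acc
  rw [h]
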